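-- pv_equiv track=rewrite | github.com/aleserena/metagameAnalyzer | scripts/fix_unnamed_placeholder_matchups.py | _multiplicity
-- ===== SOURCE A (Python) =====
-- def _multiplicity(values: list[int]) -> tuple[int | None, bool]:
--     """Return (single value if exactly one distinct, is_ambiguous if more than one distinct)."""
--     seen: list[int] = []
--     for v in values:
--         if v not in seen:
--             seen.append(v)
--     if len(seen) == 1:
--         return seen[0], False
--     if len(seen) > 1:
--         return None, True
--     return None, False
-- ===== SOURCE B (Python) =====
-- def _multiplicity(values: list[int]) -> tuple[int | None, bool]:
--     """Return (single value if exactly one distinct, is_ambiguous if more than one distinct)."""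
--     if not values:
--         return None, False
--     first = values[0]
--     if all(v == first for v in values):
--         return first, False
--     return None, True
-- ===== Notes on version B (the rewrite author's own statement) =====
-- stated objective: faster
-- what changed: Instead of building a deduplicated 'seen' list (with an inner membership scan) and branching on its length, B keeps only the first element and one all-equal pass over the list.
import Mathlib
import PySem

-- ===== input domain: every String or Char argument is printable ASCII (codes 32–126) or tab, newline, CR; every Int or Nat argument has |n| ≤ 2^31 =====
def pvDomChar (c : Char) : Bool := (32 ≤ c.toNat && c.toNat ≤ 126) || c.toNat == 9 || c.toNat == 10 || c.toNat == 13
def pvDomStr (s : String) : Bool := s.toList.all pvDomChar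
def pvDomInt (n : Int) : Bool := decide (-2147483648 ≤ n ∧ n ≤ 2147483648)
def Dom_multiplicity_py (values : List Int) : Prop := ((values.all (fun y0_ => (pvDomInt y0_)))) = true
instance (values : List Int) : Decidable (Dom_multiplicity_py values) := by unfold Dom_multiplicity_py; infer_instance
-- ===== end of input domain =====

-- B replaces A's deduplicated 'seen' list by a reference to the first element and one all-equal test; objective: simpler.


-- ===== PORT A =====
-- loop body: 'if v not in seen: seen.append(v)'
def pvStepA (seen : List Int) (v : Int) : List Int := if v ∈ seen then seen else seen ++ [v]

def multiplicity_py (values : List Int) : Option Int × Bool :=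
  let seen := values.foldl pvStepA []
  if seen.length = 1 then (PySem.List.pyGet? seen 0, false)
  else if seen.length > 1 then (none, true)
  else (none, false)

-- ===== PORT B =====
def multiplicity_py_alt (values : List Int) : Option Int × Bool :=
  match values with
  | [] => (none, false)
  | first :: _ =>
    if values.all (fun v => v == first) then (some first, false) else (none, true)

-- ===== PRECONDITION & SPEC =====
def Spec_multiplicity_py (values : List Int) (out : Option Int × Bool) : Prop := out = multiplicity_py_alt values
instance (values : List Int) (out : Option Int × Bool) : Decidable (Spec_multiplicity_py values out) := by unfold Spec_multiplicity_py; infer_instance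

-- ===== CLAIM (what is proved, stated in full; the proofs are below) =====
def Claim_equal_multiplicity_py : Prop := ∀ (values : List Int), Dom_multiplicity_py values → Spec_multiplicity_py values (multiplicity_py values)

-- ===== LEMMAS AND PROOFS =====

theorem pv_prefix_foldl : ∀ (vs acc : List Int), acc <+: vs.foldl pvStepA acc := by
  intro vs
  induction vs with
  | nil => intro acc; exact List.prefix_refl acc
  | cons v vs ih =>
    intro acc
    refine List.IsPrefix.trans ?_ (ih (pvStepA acc v))
    unfold pvStepA
    split_ifs
    · exact List.prefix_refl acc
    · exact List.prefix_append acc [v]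

theorem pv_fixed_iff : ∀ (vs : List Int) (f : Int),
    vs.foldl pvStepA [f] = [f] ↔ (∀ v ∈ vs, v = f) := by
  intro vs
  induction vs with
  | nil => intro f; simp
  | cons v vs ih =>
    intro f
    by_cases hv : v = f
    · subst hv
      simp only [List.foldl_cons, pvStepA, List.mem_singleton]
      constructor
      · intro h w hw
        rcases List.mem_cons.mp hw with h1 | h1
        · exact h1
        · exact (ih v).mp h w h1
      · intro h; exact (ih v).mpr (fun w hw => h w (List.mem_cons_of_mem v hw))
    · have hstep : pvStepA [f] v = [f, v] := by
        simp [pvStepA, hv]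
      constructor
      · intro h
        exfalso
        have hpre : [f, v] <+: (v :: vs).foldl pvStepA [f] := by
          simpa [List.foldl_cons, hstep] using pv_prefix_foldl vs [f, v]
        have := hpre.length_le
        rw [h] at this
        simp at this
      · intro h
        exact absurd (h v List.mem_cons_self) hv

theorem multiplicity_py_spec' : ∀ (values : List Int),
    multiplicity_py values = multiplicity_py_alt values := by
  intro values
  cases values with
  | nil => rfl
  | cons f rest =>
    have hseen : (f :: rest).foldl pvStepA [] = rest.foldl pvStepA [f] := by
      simp [pvStepA]
    by_cases h : ∀ v ∈ rest, v = f
    · have h1 : rest.foldl pvStepA [f] = [f] := (pv_fixed_iff rest f).mpr h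
      have hall : (f :: rest).all (fun v => v == f) = true := by
        simp only [List.all_cons, List.all_eq_true, beq_iff_eq, Bool.and_eq_true]
        exact ⟨by simp, fun v hv => by simpa using h v hv⟩
      simp [multiplicity_py, multiplicity_py_alt, hseen, h1, hall,
        PySem.List.pyGet?, PySem.List.pyIdx?]
    · have h1 : rest.foldl pvStepA [f] ≠ [f] := fun he => h ((pv_fixed_iff rest f).mp he)
      have hpre : [f] <+: rest.foldl pvStepA [f] := pv_prefix_foldl rest [f]
      have hlen : 1 < (rest.foldl pvStepA [f]).length := by
        rcases Nat.lt_or_ge 1 (rest.foldl pvStepA [f]).length with hl | hl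
        · exact hl
        · exfalso
          have h1le : 1 ≤ (rest.foldl pvStepA [f]).length := by
            simpa using hpre.length_le
          have : (rest.foldl pvStepA [f]).length = 1 := le_antisymm hl h1le
          exact h1 (hpre.eq_of_length (by simpa using this.symm)).symm
      have hall : (f :: rest).all (fun v => v == f) = false := by
        rcases not_forall.mp h with ⟨v, hv⟩
        rcases Classical.not_imp.mp hv with ⟨hmem, hne⟩
        simp only [List.all_eq_false]
        exact ⟨v, List.mem_cons_of_mem f hmem, by simpa using hne⟩
      simp [multiplicity_py, multiplicity_py_alt, hseen, hall,
        Nat.ne_of_gt hlen, hlen]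

-- ===== VERDICT (by name: the statement is the Claim_ definition above) =====
theorem multiplicity_py_spec : Claim_equal_multiplicity_py := by
  intro values _
  exact multiplicity_py_spec' values
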